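-- pv_equiv track=rewrite | github.com/JonnyPont/Python | midi_processor.py | remove_note
-- ===== SOURCE A (Python) =====
-- def remove_note(note_table,input_note):
--     'Remove a midi note from the notetable'
--     #Remove note from the noteTable
--     for temp_midi_loc in range(len(note_table)):
--         #Find OffNote message in table
--         if input_note == note_table[temp_midi_loc][1]:
--             #Shift every following note back up one
--             for k in range(temp_midi_loc,len(note_table)-1):
--                 if k < len(note_table)-1:
--                     note_table[k] = note_table[k+1]
--     #Replace final note with empty values
--     note_table[-1] = empty_midi_byte
--     return note_table
--
-- empty_midi_byte = [0,0,0,0]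
-- ===== SOURCE B (Python) =====
-- empty_midi_byte = [0, 0, 0, 0]
--
-- def remove_note(note_table, input_note):
--     'Remove a midi note from the notetable'
--     for i, row in enumerate(note_table):
--         if row[1] == input_note:
--             del note_table[i]
--             break
--     else:
--         del note_table[-1]
--     note_table.append(empty_midi_byte)
--     return note_table
-- ===== Notes on version B (the rewrite author's own statement) =====
-- stated objective: simpler
-- what changed: Replaces A's nested loops (for every match, shift every following row up by one, duplicating the last row) with a single scan that removes the first row carrying the note and appends one empty entry; Pre_ excludes the empty table (note_table[-1] raises IndexError) and tables containing a row of fewer than 2 entries, where the row[1] lookup raises IndexError except in rare cases where such a row sits behind an earlier match (see cites).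
-- intended difference: On tables where some matching row is followed, at least two places further on and before the final slot, by another matching row whose suffix of rows is not all identical, A's shift-while-iterating removes rows beyond the first match and fills freed slots with copies of the last row, while B removes only the first matching row and appends a single empty entry, the intended 'remove a midi note' behaviour. — e.g. on remove_note([[0, 1], [1, 0], [2, 1], [3, 0]], 1): A returns [[1, 0], [3, 0], [3, 0], [0, 0, 0, 0]], B returns [[1, 0], [2, 1], [3, 0], [0, 0, 0, 0]]
import Mathlib
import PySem

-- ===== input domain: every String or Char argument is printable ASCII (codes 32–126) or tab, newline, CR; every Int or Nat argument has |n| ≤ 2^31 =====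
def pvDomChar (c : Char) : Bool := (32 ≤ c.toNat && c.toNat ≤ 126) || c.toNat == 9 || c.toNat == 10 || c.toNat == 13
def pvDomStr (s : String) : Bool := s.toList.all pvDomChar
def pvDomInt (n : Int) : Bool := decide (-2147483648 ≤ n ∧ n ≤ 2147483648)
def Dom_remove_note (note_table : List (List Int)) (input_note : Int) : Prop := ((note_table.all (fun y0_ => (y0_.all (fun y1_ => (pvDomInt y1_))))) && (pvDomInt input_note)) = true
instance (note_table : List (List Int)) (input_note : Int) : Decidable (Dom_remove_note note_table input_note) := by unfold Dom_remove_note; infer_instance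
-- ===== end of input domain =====

-- B replaces A's nested shift loops by a single scan that deletes the first row
-- carrying the note and appends one empty entry; on tables with further matching rows
-- A's shift-while-iterating gives a different (unintended) value, stated as D_ below.
-- Both Pythons mutate note_table in place; the equivalence proved is about the return value.


-- ===== PORT A =====
def remove_note (note_table : List (List Int)) (input_note : Int) : List (List Int) :=
  let nt := (PySem.List.pyRange 0 (note_table.length : Int) 1).foldl
    (fun nt t =>
      if input_note == PySem.List.pyGetD (PySem.List.pyGetD nt t []) 1 0 then
        (PySem.List.pyRange t ((nt.length : Int) - 1) 1).foldl
          (fun nt k =>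
            if k < (nt.length : Int) - 1 then
              PySem.List.pySetD nt k (PySem.List.pyGetD nt (k + 1) [])
            else nt)
          nt
      else nt)
    note_table
  PySem.List.pySetD nt (-1) [0, 0, 0, 0]

-- ===== PORT B =====
-- the scan `for i, row in enumerate(...): if row[1] == input_note: del note_table[i]; break`
def rnDelFirst (x : Int) : List (List Int) → Option (List (List Int))
  | [] => none
  | r :: rs =>
    if PySem.List.pyGetD r 1 0 == x then some rs
    else (rnDelFirst x rs).map (r :: ·)

def remove_note_alt (note_table : List (List Int)) (input_note : Int) : List (List Int) :=
  (match rnDelFirst input_note note_table with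
   | some l => l                      -- del note_table[i]; break
   | none => note_table.dropLast)     -- else: del note_table[-1]
  ++ [[0, 0, 0, 0]]                   -- note_table.append(empty_midi_byte)

-- ===== PRECONDITION & SPEC =====
-- Pre_ excludes the empty table, where note_table[-1] raises IndexError, and tables
-- containing a row of fewer than 2 entries, where the row[1] lookup raises IndexError
-- except in rare cases where such a row sits behind an earlier match (see cites).
def Pre_remove_note (note_table : List (List Int)) (input_note : Int) : Prop :=
  note_table ≠ [] ∧ ∀ row ∈ note_table, 2 ≤ row.length
instance (note_table : List (List Int)) (input_note : Int) : Decidable (Pre_remove_note note_table input_note) := by unfold Pre_remove_note; infer_instance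

def pvWitness_remove_note : List (List Int) × Int := ([[0, 60], [1, 62]], 60)

-- On tables where some matching row is followed, two or more places further on and
-- before the final slot, by another matching row whose suffix of rows is not all
-- identical, A's shift-while-iterating removes rows beyond the first match and fills
-- the freed slots with copies of the last row, while B removes only the first matching
-- row and appends a single empty entry — the intended 'remove a midi note' behaviour.
def D_remove_note (note_table : List (List Int)) (input_note : Int) : Prop :=
  ((((note_table.dropWhile (fun r => !(r.getD 1 0 == input_note))).drop 2).dropWhile
      (fun r => !(r.getD 1 0 == input_note))) ≠ []) ∧
  ∃ e ∈ (((note_table.dropWhile (fun r => !(r.getD 1 0 == input_note))).drop 2).dropWhile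
      (fun r => !(r.getD 1 0 == input_note))).tail,
    e ≠ ((((note_table.dropWhile (fun r => !(r.getD 1 0 == input_note))).drop 2).dropWhile
      (fun r => !(r.getD 1 0 == input_note))).headD [])
instance (note_table : List (List Int)) (input_note : Int) : Decidable (D_remove_note note_table input_note) := by unfold D_remove_note; infer_instance

def Spec_remove_note (note_table : List (List Int)) (input_note : Int) (out : List (List Int)) : Prop := ¬ D_remove_note note_table input_note → out = remove_note_alt note_table input_note
instance (note_table : List (List Int)) (input_note : Int) (out : List (List Int)) : Decidable (Spec_remove_note note_table input_note out) := by unfold Spec_remove_note; infer_instance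

def pvDiffWitness_remove_note : List (List Int) × Int := ([[0, 1], [1, 0], [2, 1], [3, 0]], 1)
def pvDiffWitnessOut_remove_note : (List (List Int)) × (List (List Int)) :=
  ([[1, 0], [3, 0], [3, 0], [0, 0, 0, 0]], [[1, 0], [2, 1], [3, 0], [0, 0, 0, 0]])

-- ===== CLAIM (what is proved, stated in full; the proofs are below) =====
def Claim_unchanged_remove_note : Prop := ∀ (note_table : List (List Int)) (input_note : Int), Dom_remove_note note_table input_note → Pre_remove_note note_table input_note → Spec_remove_note note_table input_note (remove_note note_table input_note)
def Claim_changed_remove_note : Prop := Dom_remove_note (pvDiffWitness_remove_note.1) (pvDiffWitness_remove_note.2) ∧ Pre_remove_note (pvDiffWitness_remove_note.1) (pvDiffWitness_remove_note.2) ∧ D_remove_note (pvDiffWitness_remove_note.1) (pvDiffWitness_remove_note.2) ∧ remove_note (pvDiffWitness_remove_note.1) (pvDiffWitness_remove_note.2) = pvDiffWitnessOut_remove_note.1 ∧ remove_note_alt (pvDiffWitness_remove_note.1) (pvDiffWitness_remove_note.2) = pvDiffWitnessOut_remove_note.2 ∧ pvDiffWitnessOut_remove_note.1 ≠ pvDi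ffWitnessOut_remove_note.2
def Claim_exact_remove_note : Prop := ∀ (note_table : List (List Int)) (input_note : Int), Dom_remove_note note_table input_note → Pre_remove_note note_table input_note → D_remove_note note_table input_note → remove_note note_table input_note ≠ remove_note_alt note_table input_note

-- ===== LEMMAS AND PROOFS =====

-- A's outer loop, seen as a recursion on the suffix not yet scanned: on a match the
-- current row is dropped, the table's last row is appended, and the row now in the
-- current slot is kept without being re-checked.
def rnGo (x : Int) : List (List Int) → List (List Int)
  | [] => []
  | r :: rs =>
    if x == PySem.List.pyGetD r 1 0 then
      match rs with
      | [] => [r]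
      | r2 :: rs2 => r2 :: rnGo x (rs2 ++ [(r :: r2 :: rs2).getLastD []])
    else r :: rnGo x rs
termination_by l => l.length
decreasing_by all_goals simp

lemma rn_go_nil (x : Int) : rnGo x [] = [] := by
  rw [rnGo.eq_def]

lemma rn_go_single_pos (x : Int) (r : List Int)
    (h : (x == PySem.List.pyGetD r 1 0) = true) : rnGo x [r] = [r] := by
  rw [rnGo.eq_def]; simp [h]

lemma rn_go_cons_pos (x : Int) (r r2 : List Int) (rs2 : List (List Int))
    (h : (x == PySem.List.pyGetD r 1 0) = true) :
    rnGo x (r :: r2 :: rs2) = r2 :: rnGo x (rs2 ++ [(r :: r2 :: rs2).getLastD []]) := by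
  rw [rnGo.eq_def]; simp [h]

lemma rn_go_cons_neg (x : Int) (r : List Int) (rs : List (List Int))
    (h : (x == PySem.List.pyGetD r 1 0) = false) :
    rnGo x (r :: rs) = r :: rnGo x rs := by
  rw [rnGo.eq_def]; simp [h]

-- bridging the Python row[1] lookup to List.getD
lemma rn_match_eq (e : List Int) : PySem.List.pyGetD e 1 0 = e.getD 1 0 := by
  rw [show (1 : Int) = ((1 : Nat) : Int) by simp, PySem.List.pyGetD_natCast]

lemma rn_match_bool (x : Int) (e : List Int) (h : e.getD 1 0 = x) :
    (x == PySem.List.pyGetD e 1 0) = true := by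
  rw [rn_match_eq, beq_iff_eq]; exact h.symm

lemma rn_nonmatch_bool (x : Int) (e : List Int) (h : e.getD 1 0 ≠ x) :
    (x == PySem.List.pyGetD e 1 0) = false := by
  rw [rn_match_eq, beq_eq_false_iff_ne]; exact fun hc => h hc.symm

lemma rn_match_bool' (x : Int) (e : List Int) (h : e.getD 1 0 = x) :
    (PySem.List.pyGetD e 1 0 == x) = true := by
  rw [rn_match_eq, beq_iff_eq]; exact h

lemma rn_nonmatch_bool' (x : Int) (e : List Int) (h : e.getD 1 0 ≠ x) :
    (PySem.List.pyGetD e 1 0 == x) = false := by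
  rw [rn_match_eq, beq_eq_false_iff_ne]; exact h

-- A's inner shift loop, run on pre ++ suf from pointer |pre|: it erases the head of
-- suf and duplicates the last row.
lemma rn_inner_eq (x : Int) : ∀ (suf pre : List (List Int)), suf ≠ [] →
    (PySem.List.pyRange (pre.length : Int) (((pre ++ suf).length : Int) - 1) 1).foldl
      (fun nt k =>
        if k < (nt.length : Int) - 1 then
          PySem.List.pySetD nt k (PySem.List.pyGetD nt (k + 1) [])
        else nt) (pre ++ suf)
    = pre ++ (suf.tail ++ [suf.getLastD []]) := by
  intro suf
  induction suf with
  | nil => intro pre h; exact absurd rfl h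
  | cons a rest ih =>
    intro pre _
    cases rest with
    | nil =>
      have hb : ((pre ++ [a]).length : Int) - 1 = (pre.length : Int) := by
        simp [List.length_append]
      rw [hb, PySem.List.pyRange_one_eq_nil (le_refl _)]
      simp
    | cons b rest2 =>
      have hcons := PySem.List.pyRange_one_cons
        (a := (pre.length : Int)) (b := ((pre ++ a :: b :: rest2).length : Int) - 1)
        (by simp [List.length_append]; omega)
      rw [hcons, List.foldl_cons]
      rw [if_pos (by simp [List.length_append]; omega :
        (pre.length : Int) < (((pre ++ a :: b :: rest2).length : Int)) - 1)]
      have hget : PySem.List.pyGetD (pre ++ a :: b :: rest2) ((pre.length : Int) + 1) [] = b := by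
        have : ((pre.length : Int) + 1) = ((pre.length + 1 : Nat) : Int) := by push_cast; ring
        rw [this, PySem.List.pyGetD_natCast,
          List.getD_append_right pre _ [] _ (by omega)]
        simp
      have hset : PySem.List.pySetD (pre ++ a :: b :: rest2) ((pre.length : Int)) b
          = (pre ++ [b]) ++ (b :: rest2) := by
        rw [PySem.List.pySetD_natCast, List.set_append_right _ _ (le_refl _)]
        simp [List.set_cons_zero]
      rw [hget, hset]
      have hlen2 : ((pre ++ a :: b :: rest2).length : Int) - 1
          = (((pre ++ [b]) ++ b :: rest2).length : Int) - 1 := by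
        simp [List.length_append]
      have hlen3 : (pre.length : Int) + 1 = (((pre ++ [b]).length : Nat) : Int) := by
        simp [List.length_append]
      rw [hlen2, hlen3, ih (pre ++ [b]) (by simp)]
      simp

-- A's outer loop from pointer |pre| equals rnGo on the unscanned suffix.
lemma rn_outer_eq (x : Int) : ∀ (m : Nat) (suf pre : List (List Int)), suf.length ≤ m →
    (PySem.List.pyRange (pre.length : Int) (((pre ++ suf).length : Int)) 1).foldl
      (fun nt t =>
        if x == PySem.List.pyGetD (PySem.List.pyGetD nt t []) 1 0 then
          (PySem.List.pyRange t ((nt.length : Int) - 1) 1).foldl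
            (fun nt k =>
              if k < (nt.length : Int) - 1 then
                PySem.List.pySetD nt k (PySem.List.pyGetD nt (k + 1) [])
              else nt)
            nt
        else nt) (pre ++ suf)
    = pre ++ rnGo x suf := by
  intro m
  induction m with
  | zero =>
    intro suf pre hle
    have hnil : suf = [] := List.eq_nil_of_length_eq_zero (Nat.le_zero.mp hle)
    subst hnil
    rw [show ((pre ++ ([] : List (List Int))).length : Int) = (pre.length : Int) by simp]
    rw [PySem.List.pyRange_one_eq_nil (le_refl _)]
    simp [rn_go_nil]
  | succ m ihm =>
    intro suf pre hle
    cases suf with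
    | nil =>
      rw [show ((pre ++ ([] : List (List Int))).length : Int) = (pre.length : Int) by simp]
      rw [PySem.List.pyRange_one_eq_nil (le_refl _)]
      simp [rn_go_nil]
    | cons a rest =>
      have hcons := PySem.List.pyRange_one_cons (a := (pre.length : Int))
        (b := ((pre ++ a :: rest).length : Int))
        (by simp only [List.length_append, List.length_cons]; push_cast; omega)
      rw [hcons, List.foldl_cons]
      have hget : PySem.List.pyGetD (pre ++ a :: rest) ((pre.length : Int)) [] = a := by
        rw [PySem.List.pyGetD_natCast, List.getD_append_right pre _ [] _ (le_refl _)]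
        simp
      rw [hget]
      by_cases h : (x == PySem.List.pyGetD a 1 0) = true
      · rw [if_pos h, rn_inner_eq x (a :: rest) pre (by simp)]
        cases rest with
        | nil =>
          rw [show (a :: ([] : List (List Int))).tail ++ [(a :: ([] : List (List Int))).getLastD []]
              = [a] by simp]
          rw [PySem.List.pyRange_one_eq_nil
            (show ((pre ++ a :: ([] : List (List Int))).length : Int) ≤ (pre.length : Int) + 1 by
              simp [List.length_append])]
          rw [List.foldl_nil, rn_go_single_pos x a h]
        | cons b rest2 =>
          rw [show (a :: b :: rest2).tail ++ [(a :: b :: rest2).getLastD []]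
              = b :: (rest2 ++ [(a :: b :: rest2).getLastD []]) by simp]
          rw [show pre ++ b :: (rest2 ++ [(a :: b :: rest2).getLastD []])
              = (pre ++ [b]) ++ (rest2 ++ [(a :: b :: rest2).getLastD []]) by simp]
          rw [show (pre.length : Int) + 1 = (((pre ++ [b]).length : Nat) : Int) by
            simp [List.length_append]]
          rw [show ((pre ++ a :: b :: rest2).length : Int)
              = (((pre ++ [b]) ++ (rest2 ++ [(a :: b :: rest2).getLastD []])).length : Int) by
            simp [List.length_append]]
          rw [ihm (rest2 ++ [(a :: b :: rest2).getLastD []]) (pre ++ [b])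
            (by simp at hle ⊢; omega)]
          rw [rn_go_cons_pos x a b rest2 h]
          simp
      · rw [if_neg h]
        rw [show pre ++ a :: rest = (pre ++ [a]) ++ rest by simp]
        rw [show (pre.length : Int) + 1 = (((pre ++ [a]).length : Nat) : Int) by
          simp [List.length_append]]
        rw [ihm rest (pre ++ [a]) (by simp at hle ⊢; omega)]
        rw [rn_go_cons_neg x a rest (Bool.eq_false_iff.mpr h)]
        simp

-- A's whole scan is rnGo on the table
lemma rn_remove_note_eq (nt : List (List Int)) (x : Int) :
    remove_note nt x = PySem.List.pySetD (rnGo x nt) (-1) [0, 0, 0, 0] := by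
  simp only [remove_note]
  have hA := rn_outer_eq x nt.length nt [] (le_refl _)
  simp only [List.nil_append, List.length_nil, Nat.cast_zero] at hA
  rw [hA]

-- writing l[-1] = v is: replace the last element
lemma rn_set_last {α : Type} (v : α) : ∀ (l : List α), l ≠ [] →
    PySem.List.pySetD l (-1) v = l.dropLast ++ [v] := by
  intro l hl
  have hn : 1 ≤ l.length := List.length_pos_iff.mpr hl
  have h1 : PySem.List.pySetD l (-1) v = l.set (l.length - 1) v := by
    simp only [PySem.List.pySetD, PySem.List.pySet?, PySem.List.pyIdx?]
    rw [if_neg (by omega), if_pos (by omega)]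
    simp
  rw [h1]
  clear h1
  induction l with
  | nil => exact absurd rfl hl
  | cons a t ih =>
    cases t with
    | nil => simp
    | cons b u =>
      have := ih (by simp)
      simp only [List.length_cons, Nat.add_sub_cancel] at this ⊢
      rw [List.set_cons_succ, List.dropLast_cons₂, List.cons_append]
      simpa using this

lemma rn_go_prefix (x : Int) : ∀ (mid t : List (List Int)),
    (∀ r ∈ mid, (x == PySem.List.pyGetD r 1 0) = false) →
    rnGo x (mid ++ t) = mid ++ rnGo x t := by
  intro mid
  induction mid with
  | nil => intro t _; simp
  | cons a u ih =>
    intro t hm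
    rw [List.cons_append, rn_go_cons_neg x a _ (hm a (by simp)), ih t (fun r hr => hm r (by simp [hr]))]
    simp

lemma rn_getLastD_rep (d : List Int) : ∀ (k : Nat),
    (d :: List.replicate k d).getLastD [] = d := by
  intro k
  induction k with
  | zero => simp
  | succ k ih => rw [List.replicate_succ, List.getLastD_cons]; simpa using ih

lemma rn_getLastD_default (l : List (List Int)) (hl : l ≠ []) (a b : List Int) :
    l.getLastD a = l.getLastD b := by
  cases l with
  | nil => exact absurd rfl hl
  | cons c t => simp only [List.getLastD_cons]

lemma rn_getLastD_append_rep (s : List (List Int)) (d : List Int) (j : Nat) :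
    (s ++ List.replicate (j + 1) d).getLastD [] = d := by
  induction s with
  | nil => simpa [List.replicate_succ] using rn_getLastD_rep d j
  | cons c t ih =>
    rw [List.cons_append, List.getLastD_cons,
      rn_getLastD_default (t ++ List.replicate (j + 1) d) (by simp [List.replicate_succ]) c []]
    exact ih

lemma rn_go_replicate (x : Int) (d : List Int) : ∀ (j : Nat),
    rnGo x (List.replicate j d) = List.replicate j d := by
  intro j
  induction j with
  | zero => simp [rn_go_nil]
  | succ j ih =>
    by_cases h : (x == PySem.List.pyGetD d 1 0) = true
    · cases j with
      | zero => simpa using rn_go_single_pos x d h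
      | succ k =>
        rw [List.replicate_succ, List.replicate_succ, rn_go_cons_pos x d d _ h]
        rw [show (d :: d :: List.replicate k d).getLastD [] = d by
          rw [show (d :: d :: List.replicate k d) = d :: List.replicate (k+1) d by
            rw [List.replicate_succ]]
          exact rn_getLastD_rep d (k+1)]
        rw [← List.replicate_succ', ih]
        simp [List.replicate_succ]
    · rw [List.replicate_succ, rn_go_cons_neg x d _ (by simpa using h), ih,
        ← List.replicate_succ]

-- the value of A's scan when the table ends in k pending copies of the last row L:
-- matched rows are dropped, the row after a match is kept unchecked, and one more
-- copy of L is deferred per removal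
def rnF (x : Int) (L : List Int) : List (List Int) → Nat → List (List Int)
  | [], k => List.replicate k L
  | a :: u, k =>
    if x == PySem.List.pyGetD a 1 0 then
      match u with
      | [] => L :: List.replicate k L
      | b :: u' => b :: rnF x L u' (k + 1)
    else a :: rnF x L u k
termination_by u _ => u.length
decreasing_by all_goals simp

lemma rn_F_nil (x : Int) (L : List Int) (k : Nat) :
    rnF x L [] k = List.replicate k L := by
  rw [rnF.eq_def]

lemma rn_F_cons_neg (x : Int) (L a : List Int) (u : List (List Int)) (k : Nat)
    (h : (x == PySem.List.pyGetD a 1 0) = false) :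
    rnF x L (a :: u) k = a :: rnF x L u k := by
  rw [rnF.eq_def]; simp [h]

lemma rn_F_single_pos (x : Int) (L a : List Int) (k : Nat)
    (h : (x == PySem.List.pyGetD a 1 0) = true) :
    rnF x L [a] k = L :: List.replicate k L := by
  rw [rnF.eq_def]; simp [h]

lemma rn_F_cons_pos (x : Int) (L a b : List Int) (u : List (List Int)) (k : Nat)
    (h : (x == PySem.List.pyGetD a 1 0) = true) :
    rnF x L (a :: b :: u) k = b :: rnF x L u (k + 1) := by
  rw [rnF.eq_def]; simp [h]

-- bridge: A's scan over u followed by k+1 pending copies of L is rnF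
lemma rn_bridge (x : Int) (L : List Int) : ∀ (n : Nat) (u : List (List Int)) (k : Nat),
    u.length ≤ n → rnGo x (u ++ List.replicate (k + 1) L) = rnF x L u (k + 1) := by
  intro n
  induction n with
  | zero =>
    intro u k hle
    have : u = [] := List.eq_nil_of_length_eq_zero (Nat.le_zero.mp hle)
    subst this
    rw [List.nil_append, rn_go_replicate, rn_F_nil]
  | succ n ih =>
    intro u k hle
    cases u with
    | nil => rw [List.nil_append, rn_go_replicate, rn_F_nil]
    | cons a u' =>
      by_cases h : (x == PySem.List.pyGetD a 1 0) = true
      · cases u' with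
        | nil =>
          rw [List.cons_append, List.nil_append, List.replicate_succ,
            rn_go_cons_pos x a L _ h]
          rw [show (a :: L :: List.replicate k L).getLastD [] = L by
            rw [List.getLastD_cons]; exact rn_getLastD_rep L k]
          rw [← List.replicate_succ', rn_go_replicate]
          exact (rn_F_single_pos x L a (k + 1) h).symm
        | cons b u'' =>
          rw [List.cons_append, List.cons_append, rn_go_cons_pos x a b _ h]
          rw [show (a :: b :: (u'' ++ List.replicate (k + 1) L)).getLastD [] = L by
            rw [List.getLastD_cons, List.getLastD_cons,
              rn_getLastD_default _ (by simp [List.replicate_succ]) b []]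
            exact rn_getLastD_append_rep u'' L k]
          rw [List.append_assoc, ← List.replicate_succ']
          rw [ih u'' (k + 1) (by simp at hle ⊢; omega)]
          rw [rn_F_cons_pos x L a b u'' (k + 1) h]
      · have hf : (x == PySem.List.pyGetD a 1 0) = false := Bool.eq_false_iff.mpr h
        rw [List.cons_append, rn_go_cons_neg x a _ hf, ih u' k (by simp at hle ⊢; omega),
          rn_F_cons_neg x L a u' (k + 1) hf]

-- each pending copy of L is appended at the end
lemma rn_F_snoc (x : Int) (L : List Int) : ∀ (n : Nat) (u : List (List Int)) (k : Nat),
    u.length ≤ n → rnF x L u (k + 1) = rnF x L u k ++ [L] := by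
  intro n
  induction n with
  | zero =>
    intro u k hle
    have : u = [] := List.eq_nil_of_length_eq_zero (Nat.le_zero.mp hle)
    subst this
    rw [rn_F_nil, rn_F_nil, ← List.replicate_succ']
  | succ n ih =>
    intro u k hle
    cases u with
    | nil => rw [rn_F_nil, rn_F_nil, ← List.replicate_succ']
    | cons a u' =>
      by_cases h : (x == PySem.List.pyGetD a 1 0) = true
      · cases u' with
        | nil =>
          rw [rn_F_single_pos x L a _ h, rn_F_single_pos x L a _ h, List.replicate_succ']
          simp
        | cons b u'' =>
          rw [rn_F_cons_pos x L a b _ _ h, rn_F_cons_pos x L a b _ _ h,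
            ih u'' (k + 1) (by simp at hle ⊢; omega)]
          simp
      · have hf : (x == PySem.List.pyGetD a 1 0) = false := Bool.eq_false_iff.mpr h
        rw [rn_F_cons_neg x L a _ _ hf, rn_F_cons_neg x L a _ _ hf,
          ih u' k (by simp at hle ⊢; omega)]
        simp

-- the exact-change region, relative to the part of the table scanned after the skip:
-- some matching row is (weakly) followed by a row different from it, before the end
def rnDcore (x : Int) (l : List (List Int)) : Prop :=
  ((l.dropWhile (fun r => !(r.getD 1 0 == x))) ≠ []) ∧
  ∃ e ∈ (l.dropWhile (fun r => !(r.getD 1 0 == x))).tail,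
    e ≠ ((l.dropWhile (fun r => !(r.getD 1 0 == x))).headD [])

lemma rn_p_pos (x : Int) (r : List Int) (h : r.getD 1 0 ≠ x) :
    (!(r.getD 1 0 == x)) = true := by
  simpa using h

lemma rn_dropWhile_pre (x : Int) : ∀ (pre l : List (List Int)),
    (∀ e ∈ pre, e.getD 1 0 ≠ x) →
    (pre ++ l).dropWhile (fun r => !(r.getD 1 0 == x))
      = l.dropWhile (fun r => !(r.getD 1 0 == x)) := by
  intro pre
  induction pre with
  | nil => intro l _; simp
  | cons c t ih =>
    intro l h
    rw [List.cons_append, List.dropWhile_cons, if_pos (rn_p_pos x c (h c (by simp))),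
      ih l (fun e he => h e (by simp [he]))]

lemma rn_Dcore_uniform (x : Int) (c : List Int) (l : List (List Int))
    (h : ∀ e ∈ l, e = c) : ¬ rnDcore x l := by
  rintro ⟨hne, e, he, hdiff⟩
  apply hdiff
  have hsub : ∀ a ∈ l.dropWhile (fun r => !(r.getD 1 0 == x)), a ∈ l :=
    fun a ha => (List.dropWhile_sublist _).mem ha
  have he' : e ∈ l := hsub e (List.mem_of_mem_tail he)
  have hh : (l.dropWhile (fun r => !(r.getD 1 0 == x))).headD [] ∈ l := by
    apply hsub
    cases hw : l.dropWhile (fun r => !(r.getD 1 0 == x)) with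
    | nil => exact absurd hw hne
    | cons a t => simp
  rw [h e he', h _ hh]

lemma rn_Dcore_cons_neg (x : Int) (c : List Int) (l : List (List Int))
    (hc : c.getD 1 0 ≠ x) : rnDcore x (c :: l) ↔ rnDcore x l := by
  unfold rnDcore
  rw [List.dropWhile_cons, if_pos (rn_p_pos x c hc)]

lemma rn_Dcore_cons_match (x : Int) (a : List Int) (l : List (List Int))
    (ha : a.getD 1 0 = x) :
    rnDcore x (a :: l) ↔ ∃ e ∈ l, e ≠ a := by
  unfold rnDcore
  rw [List.dropWhile_cons, if_neg (by simpa using ha)]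
  simp

lemma rn_getLastD_mem : ∀ (u : List (List Int)) (d : List Int), u ≠ [] → u.getLastD d ∈ u := by
  intro u
  induction u with
  | nil => intro d h; exact absurd rfl h
  | cons c t ih =>
    intro d _
    cases ht : t with
    | nil => simp
    | cons z zs =>
      rw [List.getLastD_cons]
      right
      rw [← ht]
      exact ih c (by simp [ht])

-- the rotation argument: rnF can only reproduce a version of the table shifted
-- forward by the pending copies if everything involved already equals L
lemma rn_rot (x : Int) (L : List Int) : ∀ (n : Nat) (u v : List (List Int)) (k : Nat),
    u.length ≤ n → v ≠ [] →
    (rnF x L u (k + v.length) = v ++ u ++ List.replicate k L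
      ↔ ((∀ e ∈ v, e = L) ∧ (∀ e ∈ u, e = L))) := by
  intro n
  induction n with
  | zero =>
    intro u v k hle _
    have : u = [] := List.eq_nil_of_length_eq_zero (Nat.le_zero.mp hle)
    subst this
    rw [rn_F_nil]
    constructor
    · intro h
      refine ⟨fun e he => ?_, by simp⟩
      have hrep : e ∈ List.replicate (k + v.length) L := by
        rw [h]; exact List.mem_append.mpr (Or.inl (by simpa using he))
      exact List.eq_of_mem_replicate hrep
    · rintro ⟨hv, -⟩
      refine (List.eq_replicate_iff.mpr ⟨by simp; omega, fun e he => ?_⟩).symm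
      rcases List.mem_append.mp he with h' | h'
      · exact hv e (by simpa using h')
      · exact List.eq_of_mem_replicate h'
  | succ n ih =>
    intro u v k hle hv
    obtain ⟨v0, vt, rfl⟩ : ∃ v0 vt, v = v0 :: vt := by
      cases v with
      | nil => exact absurd rfl hv
      | cons v0 vt => exact ⟨v0, vt, rfl⟩
    cases u with
    | nil =>
      rw [rn_F_nil]
      constructor
      · intro h
        refine ⟨fun e he => ?_, by simp⟩
        have hrep : e ∈ List.replicate (k + (v0 :: vt).length) L := by
          rw [h]; exact List.mem_append.mpr (Or.inl (by simpa using he))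
        exact List.eq_of_mem_replicate hrep
      · rintro ⟨hvv, -⟩
        refine (List.eq_replicate_iff.mpr ⟨by simp; omega, fun e he => ?_⟩).symm
        rcases List.mem_append.mp he with h' | h'
        · exact hvv e (by simpa using h')
        · exact List.eq_of_mem_replicate h'
    | cons a u' =>
      by_cases hm : (x == PySem.List.pyGetD a 1 0) = true
      · cases u' with
        | nil =>
          rw [rn_F_single_pos x L a _ hm, ← List.replicate_succ]
          constructor
          · intro h
            have hall : ∀ e ∈ (v0 :: vt) ++ [a] ++ List.replicate k L, e = L := by
              intro e he
              have hrep : e ∈ List.replicate (k + (v0 :: vt).length + 1) L := by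
                rw [h]; exact he
              exact List.eq_of_mem_replicate hrep
            exact ⟨fun e he =>
                hall e (List.mem_append.mpr (Or.inl (List.mem_append.mpr (Or.inl he)))),
              fun e he =>
                hall e (List.mem_append.mpr (Or.inl (List.mem_append.mpr (Or.inr he))))⟩
          · rintro ⟨hvv, hu⟩
            refine (List.eq_replicate_iff.mpr ⟨by simp; omega, fun e he => ?_⟩).symm
            rcases List.mem_append.mp he with h' | h'
            · rcases List.mem_append.mp h' with h'' | h''
              · exact hvv e h''
              · exact hu e h''
            · exact List.eq_of_mem_replicate h'
        | cons b u'' =>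
          rw [rn_F_cons_pos x L a b _ _ hm]
          have hsh : (v0 :: vt) ++ (a :: b :: u'') ++ List.replicate k L
              = v0 :: ((vt ++ [a, b]) ++ u'' ++ List.replicate k L) := by simp
          rw [hsh, List.cons.injEq]
          have harg : k + (v0 :: vt).length + 1 = k + (vt ++ [a, b]).length := by
            simp; omega
          rw [harg, ih u'' (vt ++ [a, b]) k (by simp at hle ⊢; omega) (by simp)]
          constructor
          · rintro ⟨rfl, hvab, hu⟩
            have ha : a = L := hvab a (by simp)
            have hb : b = L := hvab b (by simp)
            exact ⟨fun e he => by
                rcases List.mem_cons.mp he with rfl | he'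
                · exact hb
                · exact hvab e (by simp [he']),
              fun e he => by
                rcases List.mem_cons.mp he with rfl | he'
                · exact ha
                · rcases List.mem_cons.mp he' with rfl | he''
                  · exact hb
                  · exact hu e he''⟩
          · rintro ⟨hvv, hu⟩
            have ha : a = L := hu a (by simp)
            have hb : b = L := hu b (by simp)
            have hv0 : v0 = L := hvv v0 (by simp)
            refine ⟨by rw [hb, hv0], fun e he => ?_, fun e he => hu e (by simp [he])⟩
            rcases List.mem_append.mp he with he' | he'
            · exact hvv e (by simp [he'])
            · rcases List.mem_cons.mp he' with rfl | he''
              · exact ha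
              · simp at he''
                rw [he'']
                exact hb
      · have hf : (x == PySem.List.pyGetD a 1 0) = false := Bool.eq_false_iff.mpr hm
        rw [rn_F_cons_neg x L a _ _ hf]
        have hsh : (v0 :: vt) ++ (a :: u') ++ List.replicate k L
            = v0 :: ((vt ++ [a]) ++ u' ++ List.replicate k L) := by simp
        rw [hsh, List.cons.injEq]
        have harg : k + (v0 :: vt).length = k + (vt ++ [a]).length := by simp
        rw [harg, ih u' (vt ++ [a]) k (by simp at hle ⊢; omega) (by simp)]
        constructor
        · rintro ⟨rfl, hva, hu⟩
          have ha : a = L := hva a (by simp)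
          exact ⟨fun e he => by
              rcases List.mem_cons.mp he with rfl | he'
              · exact ha
              · exact hva e (by simp [he']),
            fun e he => by
              rcases List.mem_cons.mp he with rfl | he'
              · exact ha
              · exact hu e he'⟩
        · rintro ⟨hvv, hu⟩
          have ha : a = L := hu a (by simp)
          have hv0 : v0 = L := hvv v0 (by simp)
          refine ⟨by rw [ha, hv0], fun e he => ?_, fun e he => hu e (by simp [he])⟩
          rcases List.mem_append.mp he with he' | he'
          · exact hvv e (by simp [he'])
          · simp at he'
            rw [he']
            exact ha

-- the central characterization: the scan reproduces the shifted table exactly when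
-- no further effective removal happens
lemma rn_phi (x : Int) (L : List Int) : ∀ (n : Nat) (u : List (List Int)) (k : Nat),
    u.length ≤ n → (k = 0 → u = [] ∨ u.getLastD [] = L) →
    (rnF x L u k = u ++ List.replicate k L ↔ ¬ rnDcore x (u ++ List.replicate k L)) := by
  intro n
  induction n with
  | zero =>
    intro u k hle _
    have : u = [] := List.eq_nil_of_length_eq_zero (Nat.le_zero.mp hle)
    subst this
    rw [rn_F_nil, List.nil_append]
    exact iff_of_true rfl (rn_Dcore_uniform x L _ (fun e he => List.eq_of_mem_replicate he))
  | succ n ih =>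
    intro u k hle hside
    cases u with
    | nil =>
      rw [rn_F_nil, List.nil_append]
      exact iff_of_true rfl (rn_Dcore_uniform x L _ (fun e he => List.eq_of_mem_replicate he))
    | cons a u' =>
      by_cases hm : a.getD 1 0 = x
      · cases u' with
        | nil =>
          rw [rn_F_single_pos x L a k (rn_match_bool x a hm), List.cons_append,
            List.nil_append, List.cons.injEq]
          rw [rn_Dcore_cons_match x a _ hm]
          cases k with
          | zero =>
            have hL : L = a := by
              rcases hside rfl with h | h
              · exact absurd h (by simp)
              · simpa using h.symm
            exact iff_of_true ⟨hL, rfl⟩ (by simp)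
          | succ k' =>
            constructor
            · rintro ⟨rfl, -⟩ ⟨e, he, hea⟩
              exact hea (List.eq_of_mem_replicate he)
            · intro h
              refine ⟨?_, rfl⟩
              by_contra hLa
              exact h ⟨L, by simp, hLa⟩
        | cons b u'' =>
          rw [rn_F_cons_pos x L a b u'' k (rn_match_bool x a hm), List.cons_append,
            List.cons_append, List.cons.injEq]
          have hrot := rn_rot x L u''.length u'' [b] k (le_refl _) (by simp)
          rw [show k + ([b] : List (List Int)).length = k + 1 by simp] at hrot
          rw [show ([b] : List (List Int)) ++ u'' ++ List.replicate k L
              = b :: (u'' ++ List.replicate k L) by simp] at hrot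
          rw [hrot, rn_Dcore_cons_match x a _ hm]
          simp only [List.mem_singleton, forall_eq]
          constructor
          · rintro ⟨rfl, hbL, hu⟩
            rintro ⟨e, he, hea⟩
            apply hea
            rcases List.mem_cons.mp he with rfl | he'
            · rfl
            · rcases List.mem_append.mp he' with he'' | he''
              · rw [hu e he'', ← hbL]
              · rw [List.eq_of_mem_replicate he'', ← hbL]
          · intro h
            have hall : ∀ e ∈ b :: (u'' ++ List.replicate k L), e = a := by
              intro e he
              by_contra hea
              exact h ⟨e, he, hea⟩
            have hba : b = a := hall b (by simp)
            have hua : ∀ e ∈ u'', e = a := fun e he => hall e (by simp [he])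
            have hLa : k ≠ 0 → L = a := by
              intro hk
              apply hall L
              right
              apply List.mem_append.mpr
              right
              simp
              omega
            have hbL : b = L := by
              cases hk : k with
              | zero =>
                rcases hside hk with h' | h'
                · exact absurd h' (by simp)
                · have hLdef : u''.getLastD b = L := by
                    rw [List.getLastD_cons, List.getLastD_cons] at h'
                    exact h'
                  by_cases hu0 : u'' = []
                  · rw [hu0] at hLdef
                    simpa using hLdef
                  · have hmem : u''.getLastD b ∈ u'' := rn_getLastD_mem u'' b hu0
                    have hLa' : L = a := by
                      rw [← hLdef]
                      exact hua _ hmem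
                    exact hba.trans hLa'.symm
              | succ k' =>
                exact hba.trans (hLa (by omega)).symm
            exact ⟨hba, hbL, fun e he => by rw [hua e he, ← hba, hbL]⟩
      · have hf := rn_nonmatch_bool x a hm
        rw [rn_F_cons_neg x L a u' k hf, List.cons_append, List.cons.injEq]
        rw [rn_Dcore_cons_neg x a _ hm]
        have hside' : k = 0 → u' = [] ∨ u'.getLastD [] = L := by
          intro hk
          rcases hside hk with h | h
          · exact absurd h (by simp)
          · by_cases hu0 : u' = []
            · exact Or.inl hu0
            · right
              rw [List.getLastD_cons] at h
              rwa [rn_getLastD_default u' hu0 [] a]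
        rw [ih u' k (by simp at hle ⊢; omega) hside']
        simp

-- decompose a table at its first matching row
lemma rn_split (x : Int) : ∀ (l : List (List Int)),
    (∀ e ∈ l, e.getD 1 0 ≠ x) ∨
    ∃ pre r rest, l = pre ++ r :: rest ∧ (∀ e ∈ pre, e.getD 1 0 ≠ x) ∧ r.getD 1 0 = x := by
  intro l
  induction l with
  | nil => exact Or.inl (by simp)
  | cons a t ih =>
    by_cases ha : a.getD 1 0 = x
    · exact Or.inr ⟨[], a, t, by simp, by simp, ha⟩
    · rcases ih with h | ⟨pre, r, rest, rfl, hpre, hr⟩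
      · exact Or.inl (by
          intro e he
          rcases List.mem_cons.mp he with rfl | he'
          · exact ha
          · exact h e he')
      · exact Or.inr ⟨a :: pre, r, rest, by simp, by
          intro e he
          rcases List.mem_cons.mp he with rfl | he'
          · exact ha
          · exact hpre e he', hr⟩

-- B's scan on a table split at its first matching row
lemma rn_del_split (x : Int) (r : List Int) (rest : List (List Int)) (hr : r.getD 1 0 = x) :
    ∀ (pre : List (List Int)), (∀ e ∈ pre, e.getD 1 0 ≠ x) →
    rnDelFirst x (pre ++ r :: rest) = some (pre ++ rest) := by
  intro pre
  induction pre with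
  | nil =>
    intro _
    rw [List.nil_append, rnDelFirst.eq_def]
    simp [rn_match_bool' x r hr]
  | cons c t ih =>
    intro hpre
    rw [List.cons_append, rnDelFirst.eq_def]
    simp only [rn_nonmatch_bool' x c (hpre c (by simp)), Bool.false_eq_true, if_neg,
      not_false_iff]
    rw [ih (fun e he => hpre e (by simp [he]))]
    simp

lemma rn_del_none (x : Int) : ∀ (l : List (List Int)), (∀ e ∈ l, e.getD 1 0 ≠ x) →
    rnDelFirst x l = none := by
  intro l
  induction l with
  | nil => intro _; rw [rnDelFirst.eq_def]
  | cons c t ih =>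
    intro h
    rw [rnDelFirst.eq_def]
    simp only [rn_nonmatch_bool' x c (h c (by simp)), Bool.false_eq_true, if_neg,
      not_false_iff]
    rw [ih (fun e he => h e (by simp [he]))]
    rfl

-- D_ is exactly the core region past the first matching row and the skipped row
lemma rn_D_eq_core (nt : List (List Int)) (x : Int) :
    D_remove_note nt x
      ↔ rnDcore x ((nt.dropWhile (fun r => !(r.getD 1 0 == x))).drop 2) := by
  unfold D_remove_note rnDcore
  exact Iff.rfl

lemma rn_Dcore_nil (x : Int) : ¬ rnDcore x [] := by
  unfold rnDcore
  simp

lemma rn_D_decomp (pre : List (List Int)) (r : List Int) (rest : List (List Int)) (x : Int)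
    (hpre : ∀ e ∈ pre, e.getD 1 0 ≠ x) (hr : r.getD 1 0 = x) :
    D_remove_note (pre ++ r :: rest) x ↔ rnDcore x (rest.drop 1) := by
  rw [rn_D_eq_core, rn_dropWhile_pre x pre _ hpre,
    List.dropWhile_cons, if_neg (by simpa using hr)]
  rfl

lemma rn_D_nomatch (nt : List (List Int)) (x : Int)
    (h : ∀ e ∈ nt, e.getD 1 0 ≠ x) : ¬ D_remove_note nt x := by
  rw [rn_D_eq_core]
  have hw : nt.dropWhile (fun r => !(r.getD 1 0 == x)) = [] := by
    rw [List.dropWhile_eq_nil_iff]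
    intro e he
    exact rn_p_pos x e (h e he)
  rw [hw]
  exact rn_Dcore_nil x

-- the master equivalence: A and B agree exactly outside D_
lemma rn_master (nt : List (List Int)) (x : Int) (hne : nt ≠ []) :
    (remove_note nt x = remove_note_alt nt x) ↔ ¬ D_remove_note nt x := by
  rw [rn_remove_note_eq]
  rcases rn_split x nt with hall | ⟨pre, r, rest, rfl, hpre, hr⟩
  · -- no matching row at all: both replace the last row and agree; D_ cannot hold
    have hgo : rnGo x nt = nt := by
      have := rn_go_prefix x nt [] (fun e he => rn_nonmatch_bool x e (hall e he))
      simpa [rn_go_nil] using this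
    have halt : remove_note_alt nt x = nt.dropLast ++ [[0, 0, 0, 0]] := by
      unfold remove_note_alt
      rw [rn_del_none x nt hall]
    rw [hgo, halt, rn_set_last _ nt hne]
    exact iff_of_true rfl (rn_D_nomatch nt x hall)
  · have hprefix : ∀ e ∈ pre, (x == PySem.List.pyGetD e 1 0) = false :=
      fun e he => rn_nonmatch_bool x e (hpre e he)
    have halt : remove_note_alt (pre ++ r :: rest) x = (pre ++ rest) ++ [[0, 0, 0, 0]] := by
      unfold remove_note_alt
      rw [rn_del_split x r rest hr pre hpre]
    cases rest with
    | nil =>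
      rw [rn_go_prefix x pre [r] hprefix, rn_go_single_pos x r (rn_match_bool x r hr),
        rn_set_last _ (pre ++ [r]) (by simp), List.dropLast_concat, halt]
      exact iff_of_true (by simp)
        (fun hD => rn_Dcore_nil x ((rn_D_decomp pre r [] x hpre hr).mp hD))
    | cons s ss =>
      rw [rn_go_prefix x pre _ hprefix,
        rn_go_cons_pos x r s ss (rn_match_bool x r hr)]
      have hbr : rnGo x (ss ++ [(r :: s :: ss).getLastD []])
          = rnF x ((r :: s :: ss).getLastD []) ss 0 ++ [(r :: s :: ss).getLastD []] := by
        rw [show (ss ++ [(r :: s :: ss).getLastD []])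
            = ss ++ List.replicate (0 + 1) ((r :: s :: ss).getLastD []) by simp]
        rw [rn_bridge x _ ss.length ss 0 (le_refl _)]
        exact rn_F_snoc x _ ss.length ss 0 (le_refl _)
      rw [hbr, halt]
      have hshape : pre ++ s :: (rnF x ((r :: s :: ss).getLastD []) ss 0
            ++ [(r :: s :: ss).getLastD []])
          = (pre ++ s :: rnF x ((r :: s :: ss).getLastD []) ss 0)
            ++ [(r :: s :: ss).getLastD []] := by simp
      rw [hshape, rn_set_last _ _ (by simp), List.dropLast_concat]
      have hAeq : ((pre ++ s :: rnF x ((r :: s :: ss).getLastD []) ss 0) ++ [[0, 0, 0, 0]]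
            = (pre ++ s :: ss) ++ [[0, 0, 0, 0]])
          ↔ rnF x ((r :: s :: ss).getLastD []) ss 0 = ss := by
        constructor
        · intro h
          have h1 := List.append_cancel_right h
          have h2 := List.append_cancel_left h1
          exact (List.cons.injEq _ _ _ _).mp h2 |>.2
        · intro h
          rw [h]
      have hside : (0 : Nat) = 0 → ss = [] ∨ ss.getLastD [] = (r :: s :: ss).getLastD [] := by
        intro _
        by_cases hss : ss = []
        · exact Or.inl hss
        · right
          rw [List.getLastD_cons, List.getLastD_cons,
            rn_getLastD_default ss hss [] s]
      have hphi := rn_phi x ((r :: s :: ss).getLastD []) ss.length ss 0 (le_refl _) hside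
      rw [List.replicate_zero, List.append_nil] at hphi
      rw [show pre ++ (s :: ss) ++ [[0, 0, 0, 0]] = (pre ++ s :: ss) ++ [[0, 0, 0, 0]] by simp]
      rw [hAeq, hphi, rn_D_decomp pre r (s :: ss) x hpre hr]
      exact Iff.rfl

-- ===== VERDICT (by name: the statements are the Claim_ definitions above) =====
theorem remove_note_spec : Claim_unchanged_remove_note := by
  intro nt x _ hpre hD
  exact (rn_master nt x hpre.1).mpr hD

theorem remove_note_changed : Claim_changed_remove_note := by
  unfold Claim_changed_remove_note; decide

theorem remove_note_tight : Claim_exact_remove_note := by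
  intro nt x _ hpre hD heq
  exact (rn_master nt x hpre.1).mp heq hD
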